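-- pv_equiv track=rewrite | github.com/HelmholtzAI-Consultants-Munich/EffiDict | benchmarks/workloads.py | generate_sequential_circular_access_pattern
-- ===== SOURCE A (Python) =====
-- from typing import List, Iterator, Optional
-- from collections import deque
--
-- def generate_sequential_circular_access_pattern(keys: List[str], num_operations: int) -> Iterator[str]:
--     """
--     Generate sequential circular access pattern.
--
--     Keys are accessed in order, wrapping around: key_1, key_2, ..., key_N, key_1, ...
--     Simulates oligo designer toolsuite access pattern.
--
--     Args:
--         keys: List of available keys
--         num_operations: Number of operations to generate
--
--     Yields:
--         Key to access
--     """
--     if not keys: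
--         return
--
--     # Use deque for efficient circular iteration
--     key_queue = deque(keys)
--
--     for _ in range(num_operations):
--         key = key_queue[0]
--         key_queue.rotate(-1)  # Move to next key
--         yield key
-- ===== SOURCE B (Python) =====
-- def generate_sequential_circular_access_pattern(keys, num_operations):
--     """Yield keys cyclically via a modular index into the original list;
--     no rotating buffer is maintained."""
--     if not keys:
--         return
--     n = len(keys)
--     for i in range(num_operations):
--         yield keys[i % n]
-- ===== Notes on version B (the rewrite author's own statement) =====
-- stated objective: simpler
-- what changed: B drops the rotating deque entirely: instead of reading the front of a buffer and rotating it each step, B keeps only the loop index and reads keys[i % n] from the untouched input list.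
import Mathlib
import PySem

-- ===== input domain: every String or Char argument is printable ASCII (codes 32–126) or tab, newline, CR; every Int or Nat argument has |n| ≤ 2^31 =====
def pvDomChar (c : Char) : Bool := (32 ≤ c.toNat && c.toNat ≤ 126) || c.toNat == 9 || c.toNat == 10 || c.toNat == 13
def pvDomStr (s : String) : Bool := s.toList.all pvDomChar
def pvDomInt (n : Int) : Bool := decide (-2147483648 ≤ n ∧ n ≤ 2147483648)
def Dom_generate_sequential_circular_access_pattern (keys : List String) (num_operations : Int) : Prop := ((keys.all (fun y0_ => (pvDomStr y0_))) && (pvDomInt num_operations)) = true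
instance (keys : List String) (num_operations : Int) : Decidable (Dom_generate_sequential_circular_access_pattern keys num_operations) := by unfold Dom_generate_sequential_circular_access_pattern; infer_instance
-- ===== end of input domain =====

-- B replaces A's rotating deque by a plain modular index into the untouched input list (objective: simpler).

-- ===== PORT A =====
-- the generator's loop: read the front of the queue, rotate it left by one, emit the key
def pvLoopA : List String → Nat → List String
  | _, 0 => []
  | [], _ + 1 => []      -- unreachable: the queue is nonempty whenever the loop runs
  | (k :: rest), n + 1 => k :: pvLoopA (rest ++ [k]) n

def generate_sequential_circular_access_pattern (keys : List String) (num_operations : Int) : List String :=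
  if keys = [] then []
  else pvLoopA keys num_operations.toNat

-- ===== PORT B =====
def generate_sequential_circular_access_pattern_alt (keys : List String) (num_operations : Int) : List String :=
  if keys = [] then []
  else
    let n : Int := keys.length
    (PySem.List.pyRange 0 num_operations 1).map
      (fun i => PySem.List.pyGetD keys (PySem.Int.mod i n) "")

-- ===== PRECONDITION & SPEC =====
def Spec_generate_sequential_circular_access_pattern (keys : List String) (num_operations : Int) (out : List String) : Prop := out = generate_sequential_circular_access_pattern_alt keys num_operations
instance (keys : List String) (num_operations : Int) (out : List String) : Decidable (Spec_generate_sequential_circular_access_pattern keys num_operations out) := by unfold Spec_generate_sequential_circular_access_pattern; infer_instance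

-- ===== CLAIM (what is proved, stated in full; the proofs are below) =====
def Claim_equal_generate_sequential_circular_access_pattern : Prop := ∀ (keys : List String) (num_operations : Int), Dom_generate_sequential_circular_access_pattern keys num_operations → Spec_generate_sequential_circular_access_pattern keys num_operations (generate_sequential_circular_access_pattern keys num_operations)

-- ===== LEMMAS AND PROOFS =====

-- one rotation step, expressed on modular indices
lemma pvRotGetD (rest : List String) (k : String) (i : Nat) :
    (rest ++ [k]).getD (i % (rest.length + 1)) "" =
    (k :: rest).getD ((i + 1) % (rest.length + 1)) "" := by
  set n := rest.length + 1 with hn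
  have hr : i % n < n := Nat.mod_lt _ (by omega)
  have hsucc : (i + 1) % n = (i % n + 1) % n := by
    rw [Nat.add_mod]
    conv_rhs => rw [Nat.add_mod, Nat.mod_mod_of_dvd i (dvd_refl n)]
  by_cases hlast : i % n = rest.length
  · have h0 : (i + 1) % n = 0 := by
      rw [hsucc, hlast, hn]; simp
    rw [h0, hlast]
    simp [List.getD]
  · have hlt : i % n < rest.length := by omega
    have h1 : (i + 1) % n = i % n + 1 := by
      rw [hsucc]; exact Nat.mod_eq_of_lt (by omega)
    rw [h1]
    simp [List.getD, List.getElem?_append_left hlt]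

-- A's rotating loop reads exactly the modular indices of its starting queue
lemma pvLoopA_eq (m : Nat) (q : List String) (hq : q ≠ []) :
    pvLoopA q m = (List.range m).map (fun i => q.getD (i % q.length) "") := by
  induction m generalizing q with
  | zero => simp [pvLoopA]
  | succ m ih =>
    obtain ⟨k, rest, rfl⟩ := List.exists_cons_of_ne_nil hq
    rw [List.range_succ_eq_map]
    simp only [pvLoopA, List.map_cons, List.map_map]
    rw [ih (rest ++ [k]) (by simp)]
    refine congrArg₂ List.cons (by simp [List.getD]) ?_
    refine List.map_congr_left (fun i _ => ?_)
    have := pvRotGetD rest k i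
    simpa [Function.comp, List.getD, Nat.succ_eq_add_one] using this

-- ===== VERDICT (by name: the statement is the Claim_ definition above) =====
theorem generate_sequential_circular_access_pattern_spec : Claim_equal_generate_sequential_circular_access_pattern := by
  intro keys num_operations _
  unfold Spec_generate_sequential_circular_access_pattern
  unfold generate_sequential_circular_access_pattern generate_sequential_circular_access_pattern_alt
  by_cases hk : keys = []
  · simp [hk]
  · simp only [hk, ite_false]
    rw [pvLoopA_eq _ _ hk, PySem.List.pyRange_one]
    simp only [sub_zero, List.map_map]
    apply List.map_congr_left
    intro i _
    simp only [Function.comp, zero_add]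
    rw [PySem.Int.mod_natCast i keys.length, PySem.List.pyGetD_natCast]
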